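-- pv_equiv track=rewrite | github.com/iwataka/google-code-jam | 2018/practice_round/bathroom_stalls.py | solve
-- ===== SOURCE A (Python) =====
-- import math
--
-- def solve(n_stalls, n_persons):
--     max = n_stalls
--     larger_count = 1
--     smaller_count = 0
--     while n_persons > larger_count + smaller_count:
--         n_persons -= larger_count
--         n_persons -= smaller_count
--         max, larger_count, smaller_count = divideAll(max, larger_count, smaller_count)
--     return divide(max, larger_count, smaller_count, n_persons)
--
-- def divideAll(max, larger_count, smaller_count):
--     if max % 2 == 0:
--         return math.floor(max / 2), larger_count, larger_count + smaller_count * 2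
--     else:
--         return math.floor((max - 1) / 2), larger_count * 2 + smaller_count, smaller_count
--
-- def divide(max, larger_count, smaller_count, n_persons):
--     if n_persons <= larger_count:
--         if max % 2 == 0:
--             return math.floor(max / 2), math.floor(max / 2) - 1
--         else:
--             return math.floor((max - 1) / 2), math.floor((max - 1) / 2)
--     else:
--         if max % 2 == 0:
--             return math.floor(max / 2) - 1, math.floor(max / 2) - 1
--         else:
--             return math.floor((max - 1) / 2), math.floor((max - 1) / 2) - 1
-- ===== SOURCE B (Python) =====
-- def solve(n_stalls, n_persons):
--     j = n_persons.bit_length() - 1 if n_persons >= 1 else 0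
--     block = 2 ** j
--     m = n_stalls // block
--     larger = n_stalls % block + 1
--     if n_persons - (block - 1) <= larger:
--         return m // 2, (m - 1) // 2
--     else:
--         return (m - 1) // 2, (m - 2) // 2
-- ===== Notes on version B (the rewrite author's own statement) =====
-- stated objective: alternative
-- what changed: Replaces A's iterated two-class state machine (repeatedly splitting segment classes level by level) with a closed form: the stopping level is bit_length(n_persons)-1, the segment size there is n_stalls // 2**j and the count of larger segments is n_stalls % 2**j + 1.
import Mathlib
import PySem

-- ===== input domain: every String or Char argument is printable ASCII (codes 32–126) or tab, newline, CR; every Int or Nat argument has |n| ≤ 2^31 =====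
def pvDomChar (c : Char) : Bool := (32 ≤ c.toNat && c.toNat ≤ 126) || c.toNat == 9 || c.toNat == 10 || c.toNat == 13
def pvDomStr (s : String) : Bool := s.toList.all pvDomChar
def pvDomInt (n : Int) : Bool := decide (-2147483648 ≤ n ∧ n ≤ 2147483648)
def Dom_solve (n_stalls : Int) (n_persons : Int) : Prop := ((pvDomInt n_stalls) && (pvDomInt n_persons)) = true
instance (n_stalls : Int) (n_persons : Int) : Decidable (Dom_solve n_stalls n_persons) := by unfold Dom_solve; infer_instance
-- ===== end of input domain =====

-- B replaces A's level-by-level splitting loop by a closed form: the stopping level is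
-- bit_length(n_persons) - 1, the segment size there is n_stalls // 2^j, and the count of
-- larger segments is n_stalls % 2^j + 1.  Objective: alternative (closed form instead of
-- the iterated two-class state machine); identical return values proved below.

-- ===== PORT A =====
-- math.floor(max/2) is ported as floor division by 2 (exact here: max/2 is an exact
-- float for |max| ≤ 2^31, so math.floor(max/2) == max // 2 on the whole domain).
def divideAllA (mx l s : Int) : Int × Int × Int :=
  if PySem.Int.mod mx 2 = 0 then (PySem.Int.floordiv mx 2, l, l + s * 2)
  else (PySem.Int.floordiv (mx - 1) 2, l * 2 + s, s)

def divideA (mx l s p : Int) : Int × Int :=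
  if p ≤ l then
    if PySem.Int.mod mx 2 = 0 then (PySem.Int.floordiv mx 2, PySem.Int.floordiv mx 2 - 1)
    else (PySem.Int.floordiv (mx - 1) 2, PySem.Int.floordiv (mx - 1) 2)
  else
    if PySem.Int.mod mx 2 = 0 then (PySem.Int.floordiv mx 2 - 1, PySem.Int.floordiv mx 2 - 1)
    else (PySem.Int.floordiv (mx - 1) 2, PySem.Int.floordiv (mx - 1) 2 - 1)

-- A's while loop; the fuel only totalizes it (each iteration lowers n_persons by
-- larger_count + smaller_count ≥ 1, so n_persons.toNat + 1 steps always suffice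
-- from A's initial state: the guard branch is unreachable).
def loopA (fuel : Nat) (mx l s p : Int) : Int × Int :=
  match fuel with
  | 0 => divideA mx l s p
  | fuel' + 1 =>
      if p > l + s then
        let t := divideAllA mx l s
        loopA fuel' t.1 t.2.1 t.2.2 (p - l - s)
      else divideA mx l s p

def solve (n_stalls : Int) (n_persons : Int) : Int × Int :=
  loopA (n_persons.toNat + 1) n_stalls 1 0 n_persons

-- ===== PORT B =====
def solve_alt (n_stalls : Int) (n_persons : Int) : Int × Int :=
  let j : Nat := if 1 ≤ n_persons then PySem.Int.bitLength n_persons - 1 else 0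
  let block : Int := 2 ^ j
  let m := PySem.Int.floordiv n_stalls block
  let larger := PySem.Int.mod n_stalls block + 1
  if n_persons - (block - 1) ≤ larger then
    (PySem.Int.floordiv m 2, PySem.Int.floordiv (m - 1) 2)
  else
    (PySem.Int.floordiv (m - 1) 2, PySem.Int.floordiv (m - 2) 2)

-- ===== PRECONDITION & SPEC =====
def Spec_solve (n_stalls : Int) (n_persons : Int) (out : Int × Int) : Prop := out = solve_alt n_stalls n_persons
instance (n_stalls : Int) (n_persons : Int) (out : Int × Int) : Decidable (Spec_solve n_stalls n_persons out) := by unfold Spec_solve; infer_instance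

-- ===== CLAIM (what is proved, stated in full; the proofs are below) =====
def Claim_equal_solve : Prop := ∀ (n_stalls : Int) (n_persons : Int), Dom_solve n_stalls n_persons → Spec_solve n_stalls n_persons (solve n_stalls n_persons)

-- ===== LEMMAS AND PROOFS =====

-- divideA with Euclidean division (divisor 2 > 0, where Python's // and % agree with it)
theorem divideA_closed (mx l s p : Int) :
    divideA mx l s p =
      if p ≤ l then (mx / 2, (mx - 1) / 2) else ((mx - 1) / 2, (mx - 2) / 2) := by
  unfold divideA
  simp only [PySem.Int.mod_eq_emod_of_pos (show (0:Int) < 2 by norm_num),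
    PySem.Int.floordiv_eq_ediv_of_pos (show (0:Int) < 2 by norm_num)]
  split_ifs <;> rw [Prod.mk.injEq] <;> omega

-- one splitting step of A, on the state reached after j levels (b = 2^j)
theorem divideAllA_step (N b : Int) (hb : 0 < b) :
    divideAllA (PySem.Int.floordiv N b) (PySem.Int.mod N b + 1) (b - PySem.Int.mod N b - 1) =
      (PySem.Int.floordiv N (b * 2), PySem.Int.mod N (b * 2) + 1,
        b * 2 - PySem.Int.mod N (b * 2) - 1) := by
  simp only [PySem.Int.floordiv_eq_ediv_of_pos hb, PySem.Int.mod_eq_emod_of_pos hb,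
    PySem.Int.floordiv_eq_ediv_of_pos (show (0:Int) < b * 2 by omega),
    PySem.Int.mod_eq_emod_of_pos (show (0:Int) < b * 2 by omega)]
  have hdd : N / b / 2 = N / (b * 2) := Int.ediv_ediv_of_nonneg (le_of_lt hb)
  have hq : N = b * (N / b) + N % b := (Int.mul_ediv_add_emod N b).symm
  have hr0 : 0 ≤ N % b := Int.emod_nonneg N (by omega)
  have hrb : N % b < b := Int.emod_lt_of_pos N hb
  have h2q : N / b = 2 * (N / b / 2) + (N / b) % 2 := (Int.mul_ediv_add_emod (N / b) 2).symm
  have ht : (N / b) % 2 = 0 ∨ (N / b) % 2 = 1 := by omega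
  have hm : N % (b * 2) = N % b + b * ((N / b) % 2) := by
    have hrepr : N = (N % b + b * ((N / b) % 2)) + (b * 2) * (N / b / 2) := by
      linear_combination hq + b * h2q
    have hsmall : (N % b + b * ((N / b) % 2) + (b * 2) * (N / b / 2)) % (b * 2)
        = N % b + b * ((N / b) % 2) := by
      rw [Int.add_mul_emod_self_left]
      exact Int.emod_eq_of_lt (by rcases ht with h | h <;> rw [h] <;> omega)
        (by rcases ht with h | h <;> rw [h] <;> omega)
    rw [← hsmall, ← hrepr]
  unfold divideAllA
  simp only [PySem.Int.mod_eq_emod_of_pos (show (0:Int) < 2 by norm_num),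
    PySem.Int.floordiv_eq_ediv_of_pos (show (0:Int) < 2 by norm_num)]
  rcases ht with h | h <;> rw [h] at hm
  · rw [if_pos (by omega : (N / b) % 2 = 0), Prod.mk.injEq, Prod.mk.injEq]
    omega
  · rw [if_neg (by omega : ¬(N / b) % 2 = 0), Prod.mk.injEq, Prod.mk.injEq]
    omega

-- A's final divide at the stopping level j equals B's closed form.
theorem divide_eq_alt (N p : Int) (j : Nat)
    (hj : j = 0 ∨ (2:Int) ^ j ≤ p) (hub : p ≤ 2 ^ (j + 1) - 1) :
    divideA (PySem.Int.floordiv N (2 ^ j)) (PySem.Int.mod N (2 ^ j) + 1)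
      ((2:Int) ^ j - PySem.Int.mod N (2 ^ j) - 1) (p - (2 ^ j - 1)) = solve_alt N p := by
  have hb : (0:Int) < 2 ^ j := by positivity
  have hjalt : (if 1 ≤ p then PySem.Int.bitLength p - 1 else 0) = j := by
    by_cases hp : 1 ≤ p
    · rw [if_pos hp]
      have h1 : p.natAbs < 2 ^ PySem.Int.bitLength p := PySem.Int.lt_two_pow_bitLength p
      have h2 : 2 ^ (PySem.Int.bitLength p - 1) ≤ p.natAbs :=
        PySem.Int.two_pow_bitLength_le p (by omega)
      have hlo : (2:Int) ^ j ≤ p := by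
        rcases hj with h | h
        · subst h; simpa using hp
        · exact h
      have hc2 : ((2 ^ j : Nat) : Int) = (2:Int) ^ j := by push_cast; ring
      have hc3 : ((2 ^ (j + 1) : Nat) : Int) = (2:Int) ^ (j + 1) := by push_cast; ring
      have hloN : 2 ^ j ≤ p.natAbs := by omega
      have hubN : p.natAbs < 2 ^ (j + 1) := by omega
      have hjlt : j < PySem.Int.bitLength p :=
        (Nat.pow_lt_pow_iff_right (by norm_num : 1 < 2)).mp (lt_of_le_of_lt hloN h1)
      have hble : PySem.Int.bitLength p - 1 < j + 1 :=
        (Nat.pow_lt_pow_iff_right (by norm_num : 1 < 2)).mp (lt_of_le_of_lt h2 hubN)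
      omega
    · rw [if_neg hp]
      rcases hj with h | h
      · exact h.symm
      · exfalso; have : (1:Int) ≤ 2 ^ j := one_le_pow₀ (by norm_num); omega
  rw [divideA_closed]
  unfold solve_alt
  simp only [hjalt]
  simp only [PySem.Int.floordiv_eq_ediv_of_pos hb, PySem.Int.mod_eq_emod_of_pos hb,
    PySem.Int.floordiv_eq_ediv_of_pos (show (0:Int) < 2 by norm_num)]

theorem loop_eq (N p : Int) : ∀ (fuel j : Nat),
    p + 1 - 2 ^ j ≤ (fuel : Int) → (j = 0 ∨ (2:Int) ^ j ≤ p) →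
    loopA fuel (PySem.Int.floordiv N (2 ^ j)) (PySem.Int.mod N (2 ^ j) + 1)
      ((2:Int) ^ j - PySem.Int.mod N (2 ^ j) - 1) (p - (2 ^ j - 1)) = solve_alt N p
  | 0, j, hfuel, hj => by
      have h1 : (1:Int) ≤ 2 ^ j := one_le_pow₀ (by norm_num)
      have hpow : (2:Int) ^ (j + 1) = 2 ^ j * 2 := pow_succ 2 j
      exact divide_eq_alt N p j hj (by omega)
  | fuel + 1, j, hfuel, hj => by
      have h1 : (1:Int) ≤ 2 ^ j := one_le_pow₀ (by norm_num)
      have hpow : (2:Int) ^ (j + 1) = 2 ^ j * 2 := pow_succ 2 j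
      show (if p - (2 ^ j - 1) > (PySem.Int.mod N (2 ^ j) + 1) +
              ((2:Int) ^ j - PySem.Int.mod N (2 ^ j) - 1) then _ else _) = _
      by_cases hc : p - (2 ^ j - 1) > (PySem.Int.mod N (2 ^ j) + 1) +
          ((2:Int) ^ j - PySem.Int.mod N (2 ^ j) - 1)
      · rw [if_pos hc]
        have step := divideAllA_step N (2 ^ j) (by positivity)
        have IH := loop_eq N p fuel (j + 1) (by omega) (Or.inr (by omega))
        rw [← hpow] at step
        simp only [step]
        have harg : p - (2 ^ j - 1) - (PySem.Int.mod N (2 ^ j) + 1) -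
            ((2:Int) ^ j - PySem.Int.mod N (2 ^ j) - 1) = p - (2 ^ (j + 1) - 1) := by
          rw [hpow]; ring
        rw [harg]
        exact IH
      · rw [if_neg hc]
        exact divide_eq_alt N p j hj (by omega)

-- ===== VERDICT (by name: the statement is the Claim_ definition above) =====
theorem solve_spec : Claim_equal_solve := by
  intro N p _
  unfold Spec_solve solve
  have e1 : PySem.Int.floordiv N 1 = N := by
    rw [PySem.Int.floordiv_eq_ediv_of_pos (by norm_num : (0:Int) < 1)]
    exact Int.ediv_one N
  have e2 : PySem.Int.mod N 1 = 0 := by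
    rw [PySem.Int.mod_eq_emod_of_pos (by norm_num : (0:Int) < 1)]
    exact Int.emod_one N
  have h := loop_eq N p (p.toNat + 1) 0 (by simp only [pow_zero]; omega) (Or.inl rfl)
  simp only [pow_zero, e1, e2] at h
  norm_num at h
  exact h
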